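-- pv_equiv track=rewrite | github.com/AdrianaPineda/training | codeforces/1300/game_of_credit_cards.py | minimum_moriartys_flicks
-- ===== SOURCE A (Python) =====
-- def value_index_greater_or_equal_than(ordered_list, number):
--     for i in range(0, len(ordered_list)):
--         element = ordered_list[i]
--         if element >= number:
--             return i
--     return -1
--
-- def minimum_moriartys_flicks(sherlocks_card, sorted_moriarty_card):
--     moriartys_flicks = 0
--     for digit in sherlocks_card:
--         # guarantees minimum possible number of flicks Moriarty will get
--         index = value_index_greater_or_equal_than(
--             sorted_moriarty_card, digit)
--         if (index >= 0):
--             sorted_moriarty_card.pop(index)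
--         else:
--             moriartys_flicks += 1
--             sorted_moriarty_card.pop(0)
--     return moriartys_flicks
-- ===== SOURCE B (Python) =====
-- # B: a max segment tree over the moriarty positions replaces A's per-digit linear
-- # scan + in-place pop: each step finds and removes the leftmost remaining element
-- # >= digit (or the leftmost remaining element on a flick) in O(log m), so B runs in
-- # O((n+m) log m) instead of A's O(n*m).  B does not mutate its arguments (A pops
-- # from sorted_moriarty_card in place); the return values agree.
-- #
-- # Tree nodes are tuples: leaf = (value_or_None,), inner = (max_alive, left, right);
-- # a removed position holds None, and max_alive is None when the segment is empty.
--
-- def _omax(x, y):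
--     if x is None:
--         return y
--     if y is None:
--         return x
--     return max(x, y)
--
-- def _build(vals, lo, hi):
--     if hi - lo <= 1:
--         return (vals[lo],)
--     mid = (lo + hi) // 2
--     left = _build(vals, lo, mid)
--     right = _build(vals, mid, hi)
--     return (_omax(left[0], right[0]), left, right)
--
-- def _remove_first_ge(t, d):
--     """Tree with the leftmost alive leaf >= d removed, or None if there is none."""
--     if t[0] is None or t[0] < d:
--         return None
--     if len(t) == 1:
--         return (None,)
--     new_left = _remove_first_ge(t[1], d)
--     if new_left is not None:
--         return (_omax(new_left[0], t[2][0]), new_left, t[2])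
--     new_right = _remove_first_ge(t[2], d)
--     if new_right is None:
--         return None
--     return (_omax(t[1][0], new_right[0]), t[1], new_right)
--
-- def _remove_first(t):
--     """Tree with its leftmost alive leaf removed, or None if the tree is empty."""
--     if t[0] is None:
--         return None
--     if len(t) == 1:
--         return (None,)
--     new_left = _remove_first(t[1])
--     if new_left is not None:
--         return (_omax(new_left[0], t[2][0]), new_left, t[2])
--     new_right = _remove_first(t[2])
--     if new_right is None:
--         return None
--     return (_omax(t[1][0], new_right[0]), t[1], new_right)
--
-- def minimum_moriartys_flicks(sherlocks_card, sorted_moriarty_card):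
--     if not sorted_moriarty_card:
--         return len(sherlocks_card)
--     tree = _build(sorted_moriarty_card, 0, len(sorted_moriarty_card))
--     flicks = 0
--     for d in sherlocks_card:
--         removed = _remove_first_ge(tree, d)
--         if removed is None:
--             flicks += 1
--             popped = _remove_first(tree)
--             if popped is not None:
--                 tree = popped
--         else:
--             tree = removed
--     return flicks
-- ===== Notes on version B (the rewrite author's own statement) =====
-- stated objective: faster
-- what changed: The greedy step order is kept (the result is order-dependent), but A's per-digit linear index scan + in-place list.pop is replaced by an immutable max segment tree over the moriarty positions, in which the leftmost remaining element >= digit (or the leftmost remaining element on a flick) is located and removed in O(log m) per digit.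
import Mathlib
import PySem

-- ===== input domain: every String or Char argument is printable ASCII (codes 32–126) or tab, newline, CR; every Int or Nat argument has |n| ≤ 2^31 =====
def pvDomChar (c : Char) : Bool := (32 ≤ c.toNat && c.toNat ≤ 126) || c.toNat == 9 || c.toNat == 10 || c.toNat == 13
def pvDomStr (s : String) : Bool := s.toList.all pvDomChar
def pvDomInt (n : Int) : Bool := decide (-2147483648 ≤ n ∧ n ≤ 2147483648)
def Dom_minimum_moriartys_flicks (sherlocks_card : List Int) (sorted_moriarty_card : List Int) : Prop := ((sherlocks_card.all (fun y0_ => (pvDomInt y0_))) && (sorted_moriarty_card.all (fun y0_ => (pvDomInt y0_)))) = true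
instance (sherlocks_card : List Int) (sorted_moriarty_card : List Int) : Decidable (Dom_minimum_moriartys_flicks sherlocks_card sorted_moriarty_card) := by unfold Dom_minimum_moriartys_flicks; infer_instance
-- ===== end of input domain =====

-- B replaces A's per-digit linear index scan + in-place pop by a max segment tree over
-- the moriarty positions (faster; timing-checked); equivalence is about the RETURN value
-- only: A mutates sorted_moriarty_card in place, B does not.

-- ===== PORT A =====
-- for i in range(0, len(ordered_list)): element = ordered_list[i]; if element >= number: return i // return -1
def vigetAux (ordered_list : List Int) (number : Int) : List Int → Int
  | [] => -1
  | i :: rest =>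
    match PySem.List.pyGet? ordered_list i with
    | some element => if element ≥ number then i else vigetAux ordered_list number rest
    | none => -1  -- unreachable: i is drawn from range(0, len(ordered_list))

def value_index_greater_or_equal_than (ordered_list : List Int) (number : Int) : Int :=
  vigetAux ordered_list number (PySem.List.pyRange 0 ordered_list.length 1)

-- the for-loop over sherlocks_card, threading (flicks, mutated moriarty list)
def mmfLoop : List Int → Int → List Int → Int
  | [], moriartys_flicks, _ => moriartys_flicks
  | digit :: rest, moriartys_flicks, pool =>
    let index := value_index_greater_or_equal_than pool digit
    if index ≥ 0 then
      match PySem.List.pop? pool index with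
      | some r => mmfLoop rest moriartys_flicks r.2
      | none => moriartys_flicks  -- unreachable: index is in range
    else
      match PySem.List.pop? pool 0 with
      | some r => mmfLoop rest (moriartys_flicks + 1) r.2
      | none => moriartys_flicks + 1  -- Python raises IndexError here (outside Pre_)

def minimum_moriartys_flicks (sherlocks_card : List Int) (sorted_moriarty_card : List Int) : Int :=
  mmfLoop sherlocks_card 0 sorted_moriarty_card

-- ===== PORT B =====
-- tuple trees of Source B: leaf = (value_or_None,), inner = (max_alive, left, right)
inductive PTree where
  | leaf : Option Int → PTree
  | node : Option Int → PTree → PTree → PTree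
deriving Repr, DecidableEq

def PTree.mx : PTree → Option Int
  | .leaf v => v
  | .node m _ _ => m

-- _omax: None-aware max
def omaxB (x y : Option Int) : Option Int :=
  match x with
  | none => y
  | some a =>
    match y with
    | none => some a
    | some b => some (max a b)

-- _build(vals, lo, hi); 'hi - lo <= 1' as in Source B (reachable calls always have lo < hi ≤ len)
def buildT (vals : List Int) (lo hi : Nat) : PTree :=
  if _h : hi - lo ≤ 1 then .leaf vals[lo]?
  else
    let mid := (lo + hi) / 2  -- (lo+hi)//2: Nat division = Python floor division (operands nonnegative)
    let left := buildT vals lo mid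
    let right := buildT vals mid hi
    .node (omaxB left.mx right.mx) left right
termination_by hi - lo
decreasing_by all_goals omega

-- _remove_first_ge(t, d)
def removeFirstGe : PTree → Int → Option PTree
  | .leaf v, d =>
    match v with
    | none => none
    | some m => if m < d then none else some (.leaf none)
  | .node mval l r, d =>
    match mval with
    | none => none
    | some m =>
      if m < d then none
      else
        match removeFirstGe l d with
        | some new_left => some (.node (omaxB new_left.mx r.mx) new_left r)
        | none =>
          match removeFirstGe r d with
          | none => none
          | some new_right => some (.node (omaxB l.mx new_right.mx) l new_right)

-- _remove_first(t)
def removeFirst : PTree → Option PTree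
  | .leaf v =>
    match v with
    | none => none
    | some _ => some (.leaf none)
  | .node mval l r =>
    match mval with
    | none => none
    | some _ =>
      match removeFirst l with
      | some new_left => some (.node (omaxB new_left.mx r.mx) new_left r)
      | none =>
        match removeFirst r with
        | none => none
        | some new_right => some (.node (omaxB l.mx new_right.mx) l new_right)

def mmfAltLoop : List Int → Int → PTree → Int
  | [], flicks, _ => flicks
  | d :: rest, flicks, tree =>
    match removeFirstGe tree d with
    | none =>
      match removeFirst tree with
      | some popped => mmfAltLoop rest (flicks + 1) popped
      | none => mmfAltLoop rest (flicks + 1) tree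
    | some removed => mmfAltLoop rest flicks removed

def minimum_moriartys_flicks_alt (sherlocks_card : List Int) (sorted_moriarty_card : List Int) : Int :=
  if sorted_moriarty_card = [] then (sherlocks_card.length : Int)
  else mmfAltLoop sherlocks_card 0 (buildT sorted_moriarty_card 0 sorted_moriarty_card.length)

-- ===== PRECONDITION & SPEC =====
-- A pops one moriarty element per sherlock digit, so it raises IndexError exactly when
-- the moriarty card is shorter than the sherlock card; Pre_ excludes exactly those inputs.
def Pre_minimum_moriartys_flicks (sherlocks_card : List Int) (sorted_moriarty_card : List Int) : Prop :=
  sherlocks_card.length ≤ sorted_moriarty_card.length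
instance (sherlocks_card : List Int) (sorted_moriarty_card : List Int) : Decidable (Pre_minimum_moriartys_flicks sherlocks_card sorted_moriarty_card) := by unfold Pre_minimum_moriartys_flicks; infer_instance

def pvWitness_minimum_moriartys_flicks : List Int × List Int := ([3, 1], [2, 2, 4])

def Spec_minimum_moriartys_flicks (sherlocks_card : List Int) (sorted_moriarty_card : List Int) (out : Int) : Prop := out = minimum_moriartys_flicks_alt sherlocks_card sorted_moriarty_card
instance (sherlocks_card : List Int) (sorted_moriarty_card : List Int) (out : Int) : Decidable (Spec_minimum_moriartys_flicks sherlocks_card sorted_moriarty_card out) := by unfold Spec_minimum_moriartys_flicks; infer_instance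

-- ===== CLAIM (what is proved, stated in full; the proofs are below) =====
def Claim_equal_minimum_moriartys_flicks : Prop := ∀ (sherlocks_card : List Int) (sorted_moriarty_card : List Int), Dom_minimum_moriartys_flicks sherlocks_card sorted_moriarty_card → Pre_minimum_moriartys_flicks sherlocks_card sorted_moriarty_card → Spec_minimum_moriartys_flicks sherlocks_card sorted_moriarty_card (minimum_moriartys_flicks sherlocks_card sorted_moriarty_card)

-- ===== LEMMAS AND PROOFS =====

-- ---------- proof-side abstractions ----------

-- the leaves of a tree, left to right (None = removed position)
def leavesT : PTree → List (Option Int)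
  | .leaf v => [v]
  | .node _ l r => leavesT l ++ leavesT r

-- max of the alive values of an option-list
def listMax (L : List (Option Int)) : Option Int := L.foldr omaxB none

-- structural invariant: every stored max is the omaxB of its children's
def goodT : PTree → Prop
  | .leaf _ => True
  | .node m l r => goodT l ∧ goodT r ∧ m = omaxB l.mx r.mx

-- removeFirstGe on the leaf sequence
def pruneGe (d : Int) : List (Option Int) → Option (List (Option Int))
  | [] => none
  | none :: tl => (pruneGe d tl).map (none :: ·)
  | some v :: tl => if v < d then (pruneGe d tl).map (some v :: ·) else some (none :: tl)

-- removeFirst on the leaf sequence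
def pruneFirst : List (Option Int) → Option (List (Option Int))
  | [] => none
  | none :: tl => (pruneFirst tl).map (none :: ·)
  | some _ :: tl => some (none :: tl)

-- the step on the plain pool: remove the first element ≥ d, or none
def eraseFirstGe (d : Int) : List Int → Option (List Int)
  | [] => none
  | v :: t => if v < d then (eraseFirstGe d t).map (v :: ·) else some t

-- the common reference loop both ports are reduced to
def specLoop : List Int → Int → List Int → Int
  | [], f, _ => f
  | d :: rest, f, pool =>
    match eraseFirstGe d pool with
    | some p' => specLoop rest f p'
    | none => specLoop rest (f + 1) pool.tail

-- ---------- omaxB / listMax ----------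

theorem omaxB_none_right (x : Option Int) : omaxB x none = x := by
  cases x <;> rfl

theorem omaxB_assoc (x y z : Option Int) : omaxB (omaxB x y) z = omaxB x (omaxB y z) := by
  cases x <;> cases y <;> cases z <;> simp [omaxB, max_assoc]

theorem foldr_omaxB_init (L : List (Option Int)) (X : Option Int) :
    L.foldr omaxB X = omaxB (listMax L) X := by
  induction L with
  | nil => simp [listMax, omaxB]
  | cons h t ih => simp [listMax, List.foldr_cons, ih, omaxB_assoc]

theorem listMax_append (a b : List (Option Int)) :
    listMax (a ++ b) = omaxB (listMax a) (listMax b) := by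
  rw [listMax, List.foldr_append]
  exact foldr_omaxB_init a (listMax b)

theorem mx_eq_listMax (t : PTree) (h : goodT t) : t.mx = listMax (leavesT t) := by
  induction t with
  | leaf v => simp [PTree.mx, leavesT, listMax, omaxB_none_right]
  | node m l r ihl ihr =>
    obtain ⟨hl, hr, hm⟩ := h
    have hmx : PTree.mx (.node m l r) = m := rfl
    have hlv : leavesT (.node m l r) = leavesT l ++ leavesT r := rfl
    rw [hmx, hlv, listMax_append, hm, ihl hl, ihr hr]

-- listMax vs membership of alive values
theorem listMax_cons (h : Option Int) (t : List (Option Int)) :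
    listMax (h :: t) = omaxB h (listMax t) := rfl

theorem listMax_none_iff (L : List (Option Int)) :
    listMax L = none ↔ ∀ v : Int, some v ∈ L → False := by
  induction L with
  | nil => simp [listMax]
  | cons h t ih =>
    rw [listMax_cons]
    cases h with
    | none =>
      rw [show omaxB none (listMax t) = listMax t from rfl, ih]
      constructor
      · intro ha v hv
        rcases List.mem_cons.mp hv with hv' | hv'
        · simp at hv'
        · exact ha v hv'
      · intro ha v hv
        exact ha v (List.mem_cons_of_mem _ hv)
    | some v =>
      constructor
      · intro hc
        cases hM : listMax t <;> rw [hM] at hc <;> simp [omaxB] at hc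
      · intro hall
        exact (hall v (by simp)).elim

theorem listMax_some_ub (L : List (Option Int)) (M : Int) (hM : listMax L = some M) :
    ∀ v : Int, some v ∈ L → v ≤ M := by
  induction L generalizing M with
  | nil => simp [listMax] at hM
  | cons h t ih =>
    intro v hv
    rw [listMax_cons] at hM
    rcases List.mem_cons.mp hv with hv' | hv'
    · cases h with
      | none => simp at hv'
      | some w =>
        have hvw : v = w := by simpa using hv'
        rw [hvw]
        cases hM' : listMax t with
        | none =>
          rw [hM'] at hM
          have h5 : some w = some M := hM
          injection h5 with h6
          omega
        | some N =>
          rw [hM'] at hM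
          have h5 : some (max w N) = some M := hM
          injection h5 with h6
          exact h6 ▸ le_max_left w N
    · cases hM' : listMax t with
      | none => exact ((listMax_none_iff t).mp hM' v hv').elim
      | some N =>
        have hNM : N ≤ M := by
          rw [hM'] at hM
          cases h with
          | none =>
            have h5 : some N = some M := hM
            injection h5 with h6
            omega
          | some a =>
            have h5 : some (max a N) = some M := hM
            injection h5 with h6
            exact h6 ▸ le_max_right a N
        exact le_trans (ih N hM' v hv') hNM

-- ---------- pruneGe / pruneFirst on lists ----------

theorem pruneGe_none_iff (d : Int) (L : List (Option Int)) :
    pruneGe d L = none ↔ ∀ v : Int, some v ∈ L → v < d := by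
  induction L with
  | nil => simp [pruneGe]
  | cons h t ih =>
    cases h with
    | none => simpa [pruneGe] using ih
    | some v =>
      by_cases hv : v < d
      · simp [pruneGe, hv, ih]
      · simp [pruneGe, hv]

theorem pruneGe_append (d : Int) (a b : List (Option Int)) :
    pruneGe d (a ++ b) =
      match pruneGe d a with
      | some a' => some (a' ++ b)
      | none => (pruneGe d b).map (a ++ ·) := by
  induction a with
  | nil => simp [pruneGe]
  | cons h t ih =>
    cases h with
    | none =>
      simp only [List.cons_append, pruneGe, ih]
      cases pruneGe d t <;> cases pruneGe d b <;> simp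
    | some v =>
      by_cases hv : v < d
      · simp only [List.cons_append, pruneGe, if_pos hv, ih]
        cases pruneGe d t <;> cases pruneGe d b <;> simp
      · simp [pruneGe, hv]

theorem pruneFirst_none_iff (L : List (Option Int)) :
    pruneFirst L = none ↔ ∀ v : Int, some v ∈ L → False := by
  induction L with
  | nil => simp [pruneFirst]
  | cons h t ih =>
    cases h with
    | none => simpa [pruneFirst] using ih
    | some v => simp [pruneFirst]; exact ⟨v, by simp⟩

theorem pruneFirst_append (a b : List (Option Int)) :
    pruneFirst (a ++ b) =
      match pruneFirst a with
      | some a' => some (a' ++ b)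
      | none => (pruneFirst b).map (a ++ ·) := by
  induction a with
  | nil => simp [pruneFirst]
  | cons h t ih =>
    cases h with
    | none =>
      simp only [List.cons_append, pruneFirst, ih]
      cases pruneFirst t <;> cases pruneFirst b <;> simp
    | some v => simp [pruneFirst]

-- ---------- tree operations realise the list operations ----------

theorem removeFirstGe_spec (t : PTree) (d : Int) (h : goodT t) :
    (removeFirstGe t d).map leavesT = pruneGe d (leavesT t) ∧
      ∀ t', removeFirstGe t d = some t' → goodT t' := by
  induction t with
  | leaf v =>
    cases v with
    | none => simp [removeFirstGe, leavesT, pruneGe]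
    | some m =>
      by_cases hm : m < d
      · simp [removeFirstGe, leavesT, pruneGe, hm]
      · simp [removeFirstGe, leavesT, pruneGe, hm, goodT]
  | node mval l r ihl ihr =>
    obtain ⟨hl, hr, hm⟩ := h
    obtain ⟨ihl1, ihl2⟩ := ihl hl
    obtain ⟨ihr1, ihr2⟩ := ihr hr
    have hmx : mval = listMax (leavesT l ++ leavesT r) := by
      have := mx_eq_listMax (.node mval l r) ⟨hl, hr, hm⟩
      simpa [PTree.mx, leavesT] using this
    cases hmv : mval with
    | none =>
      have hmax : listMax (leavesT l ++ leavesT r) = none := by rw [← hmx, hmv]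
      have hpn : pruneGe d (leavesT l ++ leavesT r) = none := by
        rw [pruneGe_none_iff]
        intro v hv
        exact ((listMax_none_iff _).mp hmax v hv).elim
      refine ⟨?_, ?_⟩
      · simp [removeFirstGe, leavesT, hpn]
      · intro t' ht'
        simp [removeFirstGe] at ht'
    | some m =>
      by_cases hless : m < d
      · have hmax : listMax (leavesT l ++ leavesT r) = some m := by rw [← hmx, hmv]
        have hpn : pruneGe d (leavesT l ++ leavesT r) = none := by
          rw [pruneGe_none_iff]
          intro v hv
          have := listMax_some_ub _ m hmax v hv
          omega
        refine ⟨?_, ?_⟩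
        · simp [removeFirstGe, leavesT, hless, hpn]
        · intro t' ht'
          simp [removeFirstGe, hless] at ht'
      · rw [leavesT]
        constructor
        · rw [pruneGe_append]
          cases hL : removeFirstGe l d with
          | some nl =>
            have : pruneGe d (leavesT l) = some (leavesT nl) := by
              rw [← ihl1, hL]; rfl
            simp [removeFirstGe, hless, hL, this, leavesT]
          | none =>
            have hLn : pruneGe d (leavesT l) = none := by rw [← ihl1, hL]; rfl
            cases hR : removeFirstGe r d with
            | none =>
              have : pruneGe d (leavesT r) = none := by rw [← ihr1, hR]; rfl
              simp [removeFirstGe, hless, hL, hR, hLn, this]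
            | some nr =>
              have : pruneGe d (leavesT r) = some (leavesT nr) := by
                rw [← ihr1, hR]; rfl
              simp [removeFirstGe, hless, hL, hR, hLn, this, leavesT]
        · intro t' ht'
          simp only [removeFirstGe, hless] at ht'
          cases hL : removeFirstGe l d with
          | some nl =>
            rw [hL] at ht'
            simp at ht'
            subst ht'
            exact ⟨ihl2 nl hL, hr, rfl⟩
          | none =>
            rw [hL] at ht'
            cases hR : removeFirstGe r d with
            | none => rw [hR] at ht'; simp at ht'
            | some nr =>
              rw [hR] at ht'
              simp at ht'
              subst ht'
              exact ⟨hl, ihr2 nr hR, rfl⟩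

theorem removeFirst_spec (t : PTree) (h : goodT t) :
    (removeFirst t).map leavesT = pruneFirst (leavesT t) ∧
      ∀ t', removeFirst t = some t' → goodT t' := by
  induction t with
  | leaf v =>
    cases v with
    | none => simp [removeFirst, leavesT, pruneFirst]
    | some m => simp [removeFirst, leavesT, pruneFirst, goodT]
  | node mval l r ihl ihr =>
    obtain ⟨hl, hr, hm⟩ := h
    obtain ⟨ihl1, ihl2⟩ := ihl hl
    obtain ⟨ihr1, ihr2⟩ := ihr hr
    have hmx : mval = listMax (leavesT l ++ leavesT r) := by
      have := mx_eq_listMax (.node mval l r) ⟨hl, hr, hm⟩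
      simpa [PTree.mx, leavesT] using this
    cases hmv : mval with
    | none =>
      have hmax : listMax (leavesT l ++ leavesT r) = none := by rw [← hmx, hmv]
      have hpn : pruneFirst (leavesT l ++ leavesT r) = none := by
        rw [pruneFirst_none_iff]
        intro v hv
        exact (listMax_none_iff _).mp hmax v hv
      refine ⟨?_, ?_⟩
      · simp [removeFirst, leavesT, hpn]
      · intro t' ht'
        simp [removeFirst] at ht'
    | some m =>
      rw [leavesT]
      constructor
      · rw [pruneFirst_append]
        cases hL : removeFirst l with
        | some nl =>
          have : pruneFirst (leavesT l) = some (leavesT nl) := by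
            rw [← ihl1, hL]; rfl
          simp [removeFirst, hL, this, leavesT]
        | none =>
          have hLn : pruneFirst (leavesT l) = none := by rw [← ihl1, hL]; rfl
          cases hR : removeFirst r with
          | none =>
            have : pruneFirst (leavesT r) = none := by rw [← ihr1, hR]; rfl
            simp [removeFirst, hL, hR, hLn, this]
          | some nr =>
            have : pruneFirst (leavesT r) = some (leavesT nr) := by
              rw [← ihr1, hR]; rfl
            simp [removeFirst, hL, hR, hLn, this, leavesT]
      · intro t' ht'
        simp only [removeFirst] at ht'
        cases hL : removeFirst l with
        | some nl =>
          rw [hL] at ht'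
          simp at ht'
          subst ht'
          exact ⟨ihl2 nl hL, hr, rfl⟩
        | none =>
          rw [hL] at ht'
          cases hR : removeFirst r with
          | none => rw [hR] at ht'; simp at ht'
          | some nr =>
            rw [hR] at ht'
            simp at ht'
            subst ht'
            exact ⟨hl, ihr2 nr hR, rfl⟩

-- ---------- build ----------

theorem buildT_spec (vals : List Int) : ∀ (n lo hi : Nat), hi - lo = n → lo < hi → hi ≤ vals.length →
    leavesT (buildT vals lo hi) = ((vals.drop lo).take (hi - lo)).map some ∧
      goodT (buildT vals lo hi) := by
  intro n
  induction n using Nat.strong_induction_on with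
  | _ n ih =>
    intro lo hi hn hlohi hlen
    by_cases h1 : hi - lo ≤ 1
    · have hhi : hi = lo + 1 := by omega
      rw [buildT, dif_pos h1]
      have hlo : lo < vals.length := by omega
      have h3 : hi - lo = 1 := by omega
      have h2 : (vals.drop lo).take (hi - lo) = [vals[lo]] := by
        rw [h3, List.take_one, List.head?_drop]
        simp [List.getElem?_eq_getElem hlo]
      simp [leavesT, goodT, h2, hlo]
    · rw [buildT, dif_neg h1]
      have hmid1 : lo < (lo + hi) / 2 := by omega
      have hmid2 : (lo + hi) / 2 < hi := by omega
      obtain ⟨el, gl⟩ := ih ((lo + hi) / 2 - lo) (by omega) lo ((lo + hi) / 2) rfl hmid1 (by omega)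
      obtain ⟨er, gr⟩ := ih (hi - (lo + hi) / 2) (by omega) ((lo + hi) / 2) hi rfl hmid2 hlen
      constructor
      · rw [leavesT, el, er, ← List.map_append]
        congr 1
        have hdd : vals.drop ((lo + hi) / 2) = (vals.drop lo).drop ((lo + hi) / 2 - lo) := by
          rw [List.drop_drop]
          congr 1
          omega
        rw [hdd, ← List.take_add]
        congr 1
        omega
      · exact ⟨gl, gr, rfl⟩

-- ---------- filterMap connection ----------

theorem pruneGe_filterMap (d : Int) (L : List (Option Int)) :
    (pruneGe d L).map (List.filterMap id) = eraseFirstGe d (L.filterMap id) := by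
  induction L with
  | nil => simp [pruneGe, eraseFirstGe]
  | cons h t ih =>
    cases h with
    | none =>
      rw [pruneGe]
      cases hp : pruneGe d t with
      | none => simp [hp] at ih ⊢; simpa using ih
      | some l' => simp [hp] at ih ⊢; simpa using ih
    | some v =>
      by_cases hv : v < d
      · rw [pruneGe]
        simp only [List.filterMap_cons, id, eraseFirstGe, if_pos hv]
        cases hp : pruneGe d t with
        | none => simp [hp] at ih ⊢; simp [← ih]
        | some l' => simp [hp] at ih ⊢; simp [← ih]
      · simp [pruneGe, hv, eraseFirstGe]

theorem pruneFirst_filterMap (L : List (Option Int)) :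
    (pruneFirst L).map (List.filterMap id) =
      match L.filterMap id with
      | [] => none
      | _ :: t => some t := by
  induction L with
  | nil => simp [pruneFirst]
  | cons h t ih =>
    cases h with
    | none =>
      rw [pruneFirst]
      cases hp : pruneFirst t with
      | none => simp [hp] at ih ⊢; simpa using ih
      | some l' => simp [hp] at ih ⊢; simpa using ih
    | some v => simp [pruneFirst]

-- ---------- A-side characterisation ----------

def findGE (d : Int) : List Int → Option Nat
  | [] => none
  | v :: t => if v ≥ d then some 0 else (findGE d t).map (· + 1)

theorem findGE_lt_length (d : Int) (pool : List Int) (j : Nat)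
    (h : findGE d pool = some j) : j < pool.length := by
  induction pool generalizing j with
  | nil => simp [findGE] at h
  | cons v t ih =>
    simp only [findGE] at h
    split at h
    · simp_all
      omega
    · cases ht : findGE d t with
      | none => simp [ht] at h
      | some k =>
        simp [ht] at h
        subst h
        have := ih k ht
        simp
        omega

theorem vigetAux_spec (d : Int) (suf : List Int) : ∀ (pre : List Int),
    vigetAux (pre ++ suf) d (PySem.List.pyRange (pre.length) ((pre ++ suf).length) 1)
      = (match findGE d suf with
         | some j => ((pre.length + j : Nat) : Int)
         | none => -1) := by
  induction suf with
  | nil =>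
    intro pre
    rw [PySem.List.pyRange_one_eq_nil (by simp)]
    simp [vigetAux, findGE]
  | cons v t ih =>
    intro pre
    have hlt : (pre.length : Int) < ((pre ++ v :: t).length : Int) := by
      simp only [List.length_append, List.length_cons]
      omega
    rw [PySem.List.pyRange_one_cons hlt]
    simp only [vigetAux, PySem.List.pyGet?_append_length]
    by_cases hv : v ≥ d
    · simp [hv, findGE]
    · have hcast : (pre.length : Int) + 1 = ((pre ++ [v]).length : Int) := by simp
      have hlist : pre ++ v :: t = (pre ++ [v]) ++ t := by simp
      rw [if_neg hv, hcast, hlist]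
      have := ih (pre ++ [v])
      rw [this]
      simp only [findGE, if_neg hv]
      cases ht : findGE d t with
      | none => simp
      | some k => simp; ring

theorem viget_eq_findGE (pool : List Int) (d : Int) :
    value_index_greater_or_equal_than pool d
      = (match findGE d pool with
         | some j => (j : Int)
         | none => -1) := by
  have := vigetAux_spec d pool []
  simpa [value_index_greater_or_equal_than] using this

theorem eraseFirstGe_eq_findGE (d : Int) (pool : List Int) :
    eraseFirstGe d pool = (findGE d pool).map (fun j => pool.take j ++ pool.drop (j + 1)) := by
  induction pool with
  | nil => simp [eraseFirstGe, findGE]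
  | cons v t ih =>
    by_cases hv : v ≥ d
    · have : ¬ v < d := by omega
      simp [eraseFirstGe, findGE, hv, this]
    · have : v < d := by omega
      rw [eraseFirstGe, if_pos this, findGE, if_neg hv, ih]
      cases findGE d t <;> simp

theorem eraseFirstGe_length (d : Int) (pool p' : List Int)
    (h : eraseFirstGe d pool = some p') : p'.length + 1 = pool.length := by
  induction pool generalizing p' with
  | nil => simp [eraseFirstGe] at h
  | cons v t ih =>
    rw [eraseFirstGe] at h
    split at h
    · cases he : eraseFirstGe d t with
      | none => rw [he] at h; simp at h
      | some q =>
        rw [he] at h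
        simp at h
        subst h
        have := ih q he
        simp
        omega
    · simp at h
      subst h
      simp

-- ---------- the two loops equal the reference loop ----------

theorem mmfLoop_eq_specLoop (digits : List Int) : ∀ (flicks : Int) (pool : List Int),
    digits.length ≤ pool.length → mmfLoop digits flicks pool = specLoop digits flicks pool := by
  induction digits with
  | nil => intro flicks pool _; rfl
  | cons d rest ih =>
    intro flicks pool hlen
    simp only [mmfLoop, specLoop]
    cases hf : findGE d pool with
    | some j =>
      have hj : j < pool.length := findGE_lt_length d pool j hf
      have hidx : value_index_greater_or_equal_than pool d = (j : Int) := by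
        rw [viget_eq_findGE, hf]
      have he : eraseFirstGe d pool = some (pool.take j ++ pool.drop (j + 1)) := by
        rw [eraseFirstGe_eq_findGE, hf]
        rfl
      rw [hidx, if_pos (by positivity), PySem.List.pop?_natCast pool j hj, he,
        List.eraseIdx_eq_take_drop_succ]
      apply ih
      simp at hlen ⊢
      omega
    | none =>
      have hidx : value_index_greater_or_equal_than pool d = -1 := by
        rw [viget_eq_findGE, hf]
      have he : eraseFirstGe d pool = none := by
        rw [eraseFirstGe_eq_findGE, hf]
        rfl
      rw [hidx, if_neg (by omega), he]
      cases pool with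
      | nil => simp at hlen
      | cons p0 pt =>
        rw [PySem.List.pop?_zero_cons]
        simp only [List.tail_cons]
        apply ih
        simp at hlen ⊢
        omega

theorem mmfAltLoop_eq_specLoop (digits : List Int) :
    ∀ (flicks : Int) (t : PTree) (pool : List Int),
    goodT t → (leavesT t).filterMap id = pool → digits.length ≤ pool.length →
    mmfAltLoop digits flicks t = specLoop digits flicks pool := by
  induction digits with
  | nil => intro flicks t pool _ _ _; rfl
  | cons d rest ih =>
    intro flicks t pool hg hpool hlen
    obtain ⟨hge1, hge2⟩ := removeFirstGe_spec t d hg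
    simp only [mmfAltLoop, specLoop]
    cases hR : removeFirstGe t d with
    | some t' =>
      have hpg : pruneGe d (leavesT t) = some (leavesT t') := by
        rw [← hge1, hR]; rfl
      have he : eraseFirstGe d pool = some ((leavesT t').filterMap id) := by
        rw [← hpool, ← pruneGe_filterMap, hpg]; rfl
      rw [he]
      apply ih flicks t' _ (hge2 t' hR) rfl
      have := eraseFirstGe_length d pool _ he
      simp at hlen
      omega
    | none =>
      have hpg : pruneGe d (leavesT t) = none := by
        rw [← hge1, hR]; rfl
      have he : eraseFirstGe d pool = none := by
        rw [← hpool, ← pruneGe_filterMap, hpg]; rfl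
      rw [he]
      obtain ⟨hf1, hf2⟩ := removeFirst_spec t hg
      cases pool with
      | nil => simp at hlen
      | cons p0 pt =>
        cases hF : removeFirst t with
        | none =>
          have hpfn : pruneFirst (leavesT t) = none := by rw [← hf1, hF]; rfl
          have hfm := pruneFirst_filterMap (leavesT t)
          rw [hpfn, hpool] at hfm
          simp at hfm
        | some t2 =>
          have hpf : pruneFirst (leavesT t) = some (leavesT t2) := by
            rw [← hf1, hF]; rfl
          have hfm := pruneFirst_filterMap (leavesT t)
          rw [hpf, hpool] at hfm
          simp at hfm
          simp only [List.tail_cons]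
          apply ih (flicks + 1) t2 pt (hf2 t2 hF) hfm
          simp at hlen
          omega

-- ===== VERDICT (by name: the statement is the Claim_ definition above) =====
theorem minimum_moriartys_flicks_spec : Claim_equal_minimum_moriartys_flicks := by
  intro s m _ hpre
  unfold Pre_minimum_moriartys_flicks at hpre
  unfold Spec_minimum_moriartys_flicks minimum_moriartys_flicks minimum_moriartys_flicks_alt
  by_cases hm : m = []
  · subst hm
    have : s = [] := by simpa using hpre
    subst this
    rfl
  · rw [if_neg hm]
    obtain ⟨hleaves, hgood⟩ := buildT_spec m m.length 0 m.length (by omega)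
      (by cases m with | nil => exact absurd rfl hm | cons a t => simp) (le_refl _)
    rw [mmfLoop_eq_specLoop s 0 m hpre,
      mmfAltLoop_eq_specLoop s 0 _ m hgood _ hpre]
    rw [hleaves]
    simp
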